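-- pv_equiv track=rewrite | github.com/gso-bench/gso | src/pyperf/analyze_diff.py | split_diff_into_files
-- ===== SOURCE A (Python) =====
-- def split_diff_into_files(diff_text):
--     """Split the diff text into sections per file."""
--     file_sections = []
--     current_section = []
--     lines = diff_text.split("\n")
--     for line in lines:
--         if line.startswith("diff --git"):
--             if current_section:
--                 file_sections.append("\n".join(current_section))
--                 current_section = []
--         current_section.append(line)
--     if current_section:
--         file_sections.append("\n".join(current_section))
--     return file_sections
-- ===== SOURCE B (Python) =====
-- def split_diff_into_files(diff_text):
--     """Split the diff text into sections per file (index-then-slice)."""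
--     lines = diff_text.split("\n")
--     marks = [i for i, line in enumerate(lines) if line.startswith("diff --git")]
--     if not marks:
--         return ["\n".join(lines)]
--     bounds = marks + [len(lines)]
--     sections = []
--     if marks[0] != 0:
--         sections.append("\n".join(lines[0:marks[0]]))
--     for j in range(len(marks)):
--         sections.append("\n".join(lines[bounds[j]:bounds[j + 1]]))
--     return sections
-- ===== Notes on version B (the rewrite author's own statement) =====
-- stated objective: alternative
-- what changed: A makes one forward pass flushing an accumulated section at each 'diff --git' marker; B instead first collects the marker line indices, then slices the line list between consecutive boundary indices (plus an optional leading preamble slice) and joins each slice.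
import Mathlib
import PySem

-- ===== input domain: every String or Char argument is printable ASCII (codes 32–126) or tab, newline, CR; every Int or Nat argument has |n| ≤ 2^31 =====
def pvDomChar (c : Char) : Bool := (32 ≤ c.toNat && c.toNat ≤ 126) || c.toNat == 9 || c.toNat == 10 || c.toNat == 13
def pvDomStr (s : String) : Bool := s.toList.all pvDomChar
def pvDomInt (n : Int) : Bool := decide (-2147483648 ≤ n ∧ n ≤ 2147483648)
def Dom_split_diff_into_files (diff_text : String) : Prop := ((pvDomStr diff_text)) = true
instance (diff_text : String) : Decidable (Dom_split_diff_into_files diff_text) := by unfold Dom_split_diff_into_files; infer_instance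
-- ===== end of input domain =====

-- B replaces A's single forward flush-on-marker scan by a two-stage plan: collect the indices
-- of the "diff --git" marker lines, then slice the line list between consecutive boundary
-- indices and join each slice (objective: alternative).

-- ===== PORT A =====
-- line.startswith("diff --git")
def pvIsMarker (line : String) : Bool := PySem.Str.startswith line "diff --git"

-- loop body of A: on a marker line flush the (non-empty) current section, then append the line
def pvStepA (st : List String × List String) (line : String) : List String × List String :=
  let st1 := if pvIsMarker line then
      (if st.2 ≠ [] then (st.1 ++ [PySem.Str.join "\n" st.2], ([] : List String)) else st)
    else st
  (st1.1, st1.2 ++ [line])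

def split_diff_into_files (diff_text : String) : List String :=
  -- split? is always `some` here since the separator "\n" is non-empty
  let lines := (PySem.Str.split? diff_text "\n").getD []
  let st := lines.foldl pvStepA ([], [])
  if st.2 ≠ [] then st.1 ++ [PySem.Str.join "\n" st.2] else st.1

-- ===== PORT B =====
def split_diff_into_files_alt (diff_text : String) : List String :=
  let lines := (PySem.Str.split? diff_text "\n").getD []
  -- marks = [i for i, line in enumerate(lines) if line.startswith("diff --git")]
  let marks := ((PySem.List.enumerate lines 0).filter
      (fun p => PySem.Str.startswith p.2 "diff --git")).map (fun p => p.1)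
  if marks = [] then [PySem.Str.join "\n" lines]
  else
    let bounds := marks ++ [(lines.length : Int)]
    -- optional leading preamble slice lines[0:marks[0]]
    let pre := if marks.headD 0 ≠ 0 then
        [PySem.Str.join "\n" (PySem.List.slice lines (some 0) (some (marks.headD 0)))]
      else []
    -- for j in range(len(marks)): append "\n".join(lines[bounds[j]:bounds[j+1]])
    pre ++ (List.range marks.length).map (fun j =>
      PySem.Str.join "\n" (PySem.List.slice lines (some (bounds.getD j 0)) (some (bounds.getD (j + 1) 0))))

-- ===== PRECONDITION & SPEC =====
def Spec_split_diff_into_files (diff_text : String) (out : List String) : Prop := out = split_diff_into_files_alt diff_text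
instance (diff_text : String) (out : List String) : Decidable (Spec_split_diff_into_files diff_text out) := by unfold Spec_split_diff_into_files; infer_instance

-- ===== CLAIM (what is proved, stated in full; the proofs are below) =====
def Claim_equal_split_diff_into_files : Prop := ∀ (diff_text : String), Dom_split_diff_into_files diff_text → Spec_split_diff_into_files diff_text (split_diff_into_files diff_text)

-- ===== LEMMAS AND PROOFS =====

-- splitting a string never yields the empty list of pieces
lemma pvGo_ne_nil (sep : List Char) (fuel : Nat) :
    ∀ (l cur : List Char) (acc : List (List Char)),
      PySem.Chars.splitOn.go sep fuel l cur acc ≠ [] := by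
  induction fuel with
  | zero => intro l cur acc; simp [PySem.Chars.splitOn.go]
  | succ fuel ih =>
    intro l cur acc
    cases l with
    | nil => simp [PySem.Chars.splitOn.go]
    | cons c rest =>
      rw [PySem.Chars.splitOn.go]
      split
      · exact ih _ _ _
      · exact ih _ _ _

lemma pvLines_ne_nil (s : String) : (PySem.Str.split? s "\n").getD [] ≠ [] := by
  simp [PySem.Str.split?, PySem.Chars.split?, PySem.Chars.splitOn]
  intro h
  exact pvGo_ne_nil _ _ _ _ _ h

-- A's final flush, as a function of the loop state
def pvFinish (st : List String × List String) : List String :=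
  if st.2 ≠ [] then st.1 ++ [PySem.Str.join "\n" st.2] else st.1

-- reference grouping, recursing from the right: (sections starting at markers, preamble lines)
def pvFB : List String → List String × List String
  | [] => ([], [])
  | l :: ls =>
    let p := pvFB ls
    if pvIsMarker l then
      (PySem.Str.join "\n" (l :: p.2) :: p.1, [])
    else (p.1, l :: p.2)

lemma pvA_loop (ls : List String) (S C : List String) :
    pvFinish (ls.foldl pvStepA (S, C))
  = S ++ (if C ++ (pvFB ls).2 = [] then (pvFB ls).1
          else PySem.Str.join "\n" (C ++ (pvFB ls).2) :: (pvFB ls).1) := by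
  induction ls generalizing S C with
  | nil => by_cases h : C = [] <;> simp [pvFinish, pvFB, h]
  | cons l ls ih =>
    rw [List.foldl_cons]
    by_cases hm : pvIsMarker l = true
    · by_cases hc : C = []
      · have hs : pvStepA (S, C) l = (S, [l]) := by simp [pvStepA, hm, hc]
        rw [hs, ih]
        simp [pvFB, hm, hc]
      · have hs : pvStepA (S, C) l = (S ++ [PySem.Str.join "\n" C], [l]) := by
          simp [pvStepA, hm, hc]
        rw [hs, ih]
        simp [pvFB, hm, hc]
    · have hs : pvStepA (S, C) l = (S, C ++ [l]) := by simp [pvStepA, hm]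
      rw [hs, ih]
      simp [pvFB, hm, List.append_assoc]

-- relative marker indices of a list of lines
def pvRelMarks : List String → List Nat
  | [] => []
  | l :: ls => (if pvIsMarker l then [0] else []) ++ (pvRelMarks ls).map (· + 1)

-- adjacent pairs of a list
def pvAdj {α : Type} : List α → List (α × α)
  | a :: b :: t => (a, b) :: pvAdj (b :: t)
  | _ => []

lemma pvAdj_map {α β : Type} (g : α → β) : ∀ (xs : List α),
    pvAdj (xs.map g) = (pvAdj xs).map (fun p => (g p.1, g p.2)) := by
  intro xs
  induction xs with
  | nil => rfl
  | cons a t ih =>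
    cases t with
    | nil => rfl
    | cons b t' => simp only [List.map_cons, pvAdj, List.map_cons] at ih ⊢; rw [ih]

-- marker indices as A's enumerate/filter pass computes them, recursively
def pvMarksI : List String → Int → List Int
  | [], _ => []
  | l :: ls, k => (if pvIsMarker l then [k] else []) ++ pvMarksI ls (k + 1)

lemma pvEnum_marks : ∀ (ls : List String) (k : Int),
    ((PySem.List.enumerate ls k).filter (fun p => pvIsMarker p.2)).map (fun p => p.1)
  = pvMarksI ls k := by
  intro ls
  induction ls with
  | nil => intro k; simp [PySem.List.enumerate_nil, pvMarksI]
  | cons l ls ih =>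
    intro k
    rw [PySem.List.enumerate_cons, List.filter_cons]
    by_cases hm : pvIsMarker l = true <;> simp [pvMarksI, hm, ih (k + 1)]

lemma pvMarksI_eq : ∀ (ls : List String) (k : Int),
    pvMarksI ls k = (pvRelMarks ls).map (fun i : Nat => k + (i : Int)) := by
  intro ls
  induction ls with
  | nil => intro k; simp [pvMarksI, pvRelMarks]
  | cons l ls ih =>
    intro k
    by_cases hm : pvIsMarker l = true <;>
      simp only [pvMarksI, pvRelMarks, hm, if_true, if_false, Bool.false_eq_true,
        List.nil_append, List.singleton_append, List.map_cons, List.map_append, List.map_map,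
        ih (k + 1)] <;>
    · first
      | (refine List.cons_eq_cons.mpr ⟨by simp, ?_⟩
         apply List.map_congr_left
         intro i _
         simp [Function.comp]
         push_cast
         ring)
      | (apply List.map_congr_left
         intro i _
         simp [Function.comp]
         push_cast
         ring)

lemma pvRange_adj {α β : Type} (f : α → α → β) (d : α) : ∀ (ms : List α) (n : α),
    (List.range ms.length).map (fun j => f ((ms ++ [n]).getD j d) ((ms ++ [n]).getD (j + 1) d))
  = (pvAdj (ms ++ [n])).map (fun p => f p.1 p.2) := by
  intro ms
  induction ms with
  | nil => intro n; simp [pvAdj]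
  | cons a ms ih =>
    intro n
    rw [List.length_cons, List.range_succ_eq_map, List.map_cons, List.map_map]
    have htail : ((List.range ms.length).map
        ((fun j => f ((a :: (ms ++ [n])).getD j d) ((a :: (ms ++ [n])).getD (j + 1) d)) ∘ Nat.succ))
        = (pvAdj (ms ++ [n])).map (fun p => f p.1 p.2) := by
      rw [← ih n]
      apply List.map_congr_left
      intro j _
      simp
    cases ms with
    | nil => simpa [pvAdj] using htail
    | cons b ms' => simpa [pvAdj] using htail

-- the loop state that A's scan reaches, computed from the marker indices
lemma pvFB_char : ∀ (ls : List String),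
    pvFB ls
  = ((pvAdj (pvRelMarks ls ++ [ls.length])).map
        (fun p => PySem.Str.join "\n" ((ls.drop p.1).take (p.2 - p.1))),
     ls.take ((pvRelMarks ls).headD ls.length)) := by
  intro ls
  induction ls with
  | nil => simp [pvFB, pvRelMarks, pvAdj]
  | cons l ls ih =>
    have hshift : ∀ (xs : List Nat),
        (pvAdj (xs.map (· + 1) ++ [ls.length + 1])).map
            (fun p => PySem.Str.join "\n" (((l :: ls).drop p.1).take (p.2 - p.1)))
      = (pvAdj (xs ++ [ls.length])).map
            (fun p => PySem.Str.join "\n" ((ls.drop p.1).take (p.2 - p.1))) := by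
      intro xs
      have : xs.map (· + 1) ++ [ls.length + 1] = (xs ++ [ls.length]).map (· + 1) := by simp
      rw [this, pvAdj_map, List.map_map]
      apply List.map_congr_left
      intro p _
      simp [List.drop_succ_cons, Nat.add_sub_add_right]
    by_cases hm : pvIsMarker l = true
    · simp only [pvFB, hm, if_true, ih, pvRelMarks]
      cases hR : pvRelMarks ls with
      | nil =>
        rw [Prod.mk.injEq]
        refine ⟨?_, by simp⟩
        show _ = (pvAdj (([0] ++ ([] : List Nat).map (· + 1)) ++ [(l :: ls).length])).map _
        simp [pvAdj, List.take_succ_cons, List.take_length]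
      | cons r rest =>
        rw [Prod.mk.injEq]
        refine ⟨?_, by simp⟩
        show _ = (pvAdj (([0] ++ ((r :: rest).map (· + 1))) ++ [(l :: ls).length])).map _
        have hne : ([0] ++ ((r :: rest).map (· + 1))) ++ [(l :: ls).length]
            = 0 :: (r + 1) :: (rest.map (· + 1) ++ [ls.length + 1]) := by simp
        rw [hne, pvAdj, List.map_cons]
        have hform : ((r + 1) :: (rest.map (· + 1) ++ [ls.length + 1]))
            = ((r :: rest).map (· + 1) ++ [ls.length + 1]) := by simp
        rw [hform, hshift (r :: rest)]
        simp [List.take_succ_cons]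
    · simp only [pvFB, hm, Bool.false_eq_true, if_false, ih, pvRelMarks, List.nil_append]
      rw [Prod.mk.injEq]
      constructor
      · show _ = (pvAdj ((pvRelMarks ls).map (· + 1) ++ [(l :: ls).length])).map _
        rw [List.length_cons, hshift]
      · rw [List.length_cons]
        have hhead : ((pvRelMarks ls).map (· + 1)).headD (ls.length + 1)
            = (pvRelMarks ls).headD ls.length + 1 := by
          cases pvRelMarks ls <;> simp
        rw [hhead, List.take_succ_cons]

-- ===== VERDICT (by name: the statement is the Claim_ definition above) =====
theorem split_diff_into_files_spec : Claim_equal_split_diff_into_files := by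
  intro diff_text _
  unfold Spec_split_diff_into_files split_diff_into_files split_diff_into_files_alt
  set ls := (PySem.Str.split? diff_text "\n").getD [] with hls
  have hne : ls ≠ [] := pvLines_ne_nil diff_text
  have hmarks : ((PySem.List.enumerate ls 0).filter
        (fun p => PySem.Str.startswith p.2 "diff --git")).map (fun p => p.1)
      = (pvRelMarks ls).map (fun i : Nat => (i : Int)) := by
    have h1 := pvEnum_marks ls 0
    rw [pvMarksI_eq ls 0] at h1
    simpa [pvIsMarker] using h1
  show pvFinish (ls.foldl pvStepA ([], [])) = _
  rw [pvA_loop ls [] [], List.nil_append, List.nil_append, pvFB_char ls]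
  simp only [hmarks]
  cases hR : pvRelMarks ls with
  | nil =>
    simp [hR, pvAdj, List.take_length, hne]
  | cons r rest =>
    simp only [hR, List.map_cons, List.headD_cons]
    rw [if_neg (by simp : ¬ (((r : Int) :: rest.map (fun i : Nat => (i : Int))) = []))]
    have hbounds : ((r : Int) :: rest.map (fun i : Nat => (i : Int))) ++ [(ls.length : Int)]
        = ((r :: rest) ++ [ls.length]).map (fun i : Nat => (i : Int)) := by simp
    have hchunks : (List.range ((r : Int) :: rest.map (fun i : Nat => (i : Int))).length).map
        (fun j => PySem.Str.join "\n" (PySem.List.slice ls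
            (some ((((r : Int) :: rest.map (fun i : Nat => (i : Int))) ++ [(ls.length : Int)]).getD j 0))
            (some ((((r : Int) :: rest.map (fun i : Nat => (i : Int))) ++ [(ls.length : Int)]).getD (j + 1) 0))))
        = (pvAdj ((r :: rest) ++ [ls.length])).map
            (fun p => PySem.Str.join "\n" ((ls.drop p.1).take (p.2 - p.1))) := by
      rw [pvRange_adj (fun a b => PySem.Str.join "\n" (PySem.List.slice ls (some a) (some b))) (0 : Int),
        hbounds, pvAdj_map, List.map_map]
      apply List.map_congr_left
      intro p _
      simp [PySem.List.slice_natCast]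
    rw [hchunks]
    by_cases hr : r = 0
    · subst hr
      simp
    · have htake : ls.take r ≠ [] := by
        simp [List.take_eq_nil_iff, hr, hne]
      rw [if_neg htake, if_pos (by exact_mod_cast hr : ((r : Int) ≠ 0))]
      have hsl : PySem.List.slice ls (some (0 : Int)) (some ((r : Nat) : Int)) = ls.take r := by
        rw [PySem.List.slice_zero_start, PySem.List.slice_to_natCast]
      rw [hsl]
      simp
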